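-- pv_equiv track=rewrite | github.com/griffinhiggins/100AlgorithmsChallenge | tasksType/tasksType.py | tasksType
-- ===== SOURCE A (Python) =====
-- def tasksType(arr,day):
--     retArr = [0,0,0]
--     for i in arr:
--         if i <= day:
--             retArr[0]+=1
--         elif i <= 7 + day:
--             retArr[1]+=1
--         else:
--             retArr[2]+=1
--     return retArr
-- ===== SOURCE B (Python) =====
-- def tasksType(arr, day):
--     c0 = sum(1 for i in arr if i <= day)
--     c1 = sum(1 for i in arr if day < i <= 7 + day)
--     c2 = sum(1 for i in arr if i > 7 + day)
--     return [c0, c1, c2]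
-- ===== Notes on version B (the rewrite author's own statement) =====
-- stated objective: alternative
-- what changed: Replaces the single branching loop that mutates a three-cell accumulator with three independent counting passes over arr, one per bucket, the middle condition being the exact complement of the other two.
import Mathlib
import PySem

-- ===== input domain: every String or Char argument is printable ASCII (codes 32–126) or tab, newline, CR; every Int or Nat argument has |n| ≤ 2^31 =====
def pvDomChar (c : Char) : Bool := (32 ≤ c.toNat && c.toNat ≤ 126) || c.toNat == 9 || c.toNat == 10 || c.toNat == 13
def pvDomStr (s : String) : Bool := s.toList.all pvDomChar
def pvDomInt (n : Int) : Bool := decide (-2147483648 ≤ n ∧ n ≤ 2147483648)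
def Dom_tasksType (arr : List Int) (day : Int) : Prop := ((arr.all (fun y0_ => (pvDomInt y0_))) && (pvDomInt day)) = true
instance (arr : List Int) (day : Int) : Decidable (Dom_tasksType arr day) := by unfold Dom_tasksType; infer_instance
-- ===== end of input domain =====

-- B replaces A's single branching loop over a mutable triple with three independent counting passes, one per bucket (alternative decomposition, same cost).

-- ===== PORT A =====
-- single left fold over arr carrying the triple (retArr[0], retArr[1], retArr[2])
def tasksType (arr : List Int) (day : Int) : List Int :=
  let r := arr.foldl (fun (st : Int × Int × Int) i =>
      if i ≤ day then (st.1 + 1, st.2.1, st.2.2)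
      else if i ≤ 7 + day then (st.1, st.2.1 + 1, st.2.2)
      else (st.1, st.2.1, st.2.2 + 1)) (0, 0, 0)
  [r.1, r.2.1, r.2.2]

-- ===== PORT B =====
-- three independent passes, one count per bucket
def tasksType_alt (arr : List Int) (day : Int) : List Int :=
  let c0 : Int := (arr.countP (fun i => i ≤ day) : Nat)
  let c1 : Int := (arr.countP (fun i => day < i ∧ i ≤ 7 + day) : Nat)
  let c2 : Int := (arr.countP (fun i => 7 + day < i) : Nat)
  [c0, c1, c2]

-- ===== PRECONDITION & SPEC =====
def Spec_tasksType (arr : List Int) (day : Int) (out : List Int) : Prop := out = tasksType_alt arr day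
instance (arr : List Int) (day : Int) (out : List Int) : Decidable (Spec_tasksType arr day out) := by unfold Spec_tasksType; infer_instance

-- ===== CLAIM (what is proved, stated in full; the proofs are below) =====
def Claim_equal_tasksType : Prop := ∀ (arr : List Int) (day : Int), Dom_tasksType arr day → Spec_tasksType arr day (tasksType arr day)

-- ===== LEMMAS AND PROOFS =====

-- loop invariant: the fold starting from any triple adds the three bucket counts componentwise
theorem tasksType_fold_counts (arr : List Int) (day : Int) (a b c : Int) :
    arr.foldl (fun (st : Int × Int × Int) i =>
      if i ≤ day then (st.1 + 1, st.2.1, st.2.2)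
      else if i ≤ 7 + day then (st.1, st.2.1 + 1, st.2.2)
      else (st.1, st.2.1, st.2.2 + 1)) (a, b, c)
    = (a + (arr.countP (fun i => i ≤ day) : Nat),
       b + (arr.countP (fun i => day < i ∧ i ≤ 7 + day) : Nat),
       c + (arr.countP (fun i => 7 + day < i) : Nat)) := by
  induction arr generalizing a b c with
  | nil => simp
  | cons x xs ih =>
    simp only [List.foldl_cons, List.countP_cons]
    by_cases h1 : x ≤ day
    · simp only [if_pos h1, ih]
      have h2 : ¬ (day < x ∧ x ≤ 7 + day) := by omega
      have h3 : ¬ (7 + day < x) := by omega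
      simp only [decide_eq_true_eq, h1, h2, h3]
      simp; omega
    · by_cases h2 : x ≤ 7 + day
      · simp only [if_neg h1, if_pos h2, ih]
        have h2' : day < x ∧ x ≤ 7 + day := by omega
        have h3 : ¬ (7 + day < x) := by omega
        simp only [decide_eq_true_eq, h1, h2', h3]
        simp; omega
      · simp only [if_neg h1, if_neg h2, ih]
        have h2' : ¬ (day < x ∧ x ≤ 7 + day) := by omega
        have h3 : 7 + day < x := by omega
        simp only [decide_eq_true_eq, h1, h2', h3]
        simp; omega

-- ===== VERDICT (by name: the statement is the Claim_ definition above) =====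
theorem tasksType_spec : Claim_equal_tasksType := by
  intro arr day _
  unfold Spec_tasksType tasksType tasksType_alt
  simp only [tasksType_fold_counts, zero_add]
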